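-- pv_equiv track=rewrite | github.com/chngr/kakko | RamseyNumber/classification/cartan.py | simple_root_helper
-- ===== SOURCE A (Python) =====
-- def simple_root_helper(pos_roots):
--     simple_roots = []
--     bad_roots = []
--     for i in range(len(pos_roots)):
--         for j in range(i+1,len(pos_roots)):
--             for k in range(j+1,len(pos_roots)):
--                 if pos_roots[i] + pos_roots[j] == pos_roots[k]:
--                     bad_roots.append(k)
--                 if pos_roots[j] + pos_roots[k] == pos_roots[i]:
--                     bad_roots.append(i)
--                 if pos_roots[k] + pos_roots[i] == pos_roots[j]:
--                     bad_roots.append(j)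
--     bad_roots_unique = sorted(list(set(bad_roots)))
--     for i in range(len(bad_roots_unique)-1,-1,-1):
--         pos_roots.pop(bad_roots_unique[i])
--     simple_roots = pos_roots
--     return simple_roots
-- ===== SOURCE B (Python) =====
-- def simple_root_helper(pos_roots):
--     # One-sentence note: like A, mutates pos_roots in place (via slice assignment) and returns it.
--     n = len(pos_roots)
--     cnt = {}
--     for v in pos_roots:
--         cnt[v] = cnt.get(v, 0) + 1
--     kept = []
--     for m in range(n):
--         vm = pos_roots[m]
--         bad = False
--         for p in range(n):
--             if p == m:
--                 continue
--             t = vm - pos_roots[p]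
--             avail = cnt.get(t, 0)
--             if vm == t:
--                 avail -= 1
--             if pos_roots[p] == t:
--                 avail -= 1
--             if avail >= 1:
--                 bad = True
--                 break
--         if not bad:
--             kept.append(vm)
--     pos_roots[:] = kept
--     return pos_roots
-- ===== Notes on version B (the rewrite author's own statement) =====
-- stated objective: faster
-- what changed: A scans all O(n^3) index triples to collect 'bad' indices, dedups, sorts and pops them in place; B builds a value->count dictionary once and, for each index m, scans the n candidate partners p checking in O(1) via the counter whether vm - pos_roots[p] occurs at a third index, building the kept list in one pass.
import Mathlib
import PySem

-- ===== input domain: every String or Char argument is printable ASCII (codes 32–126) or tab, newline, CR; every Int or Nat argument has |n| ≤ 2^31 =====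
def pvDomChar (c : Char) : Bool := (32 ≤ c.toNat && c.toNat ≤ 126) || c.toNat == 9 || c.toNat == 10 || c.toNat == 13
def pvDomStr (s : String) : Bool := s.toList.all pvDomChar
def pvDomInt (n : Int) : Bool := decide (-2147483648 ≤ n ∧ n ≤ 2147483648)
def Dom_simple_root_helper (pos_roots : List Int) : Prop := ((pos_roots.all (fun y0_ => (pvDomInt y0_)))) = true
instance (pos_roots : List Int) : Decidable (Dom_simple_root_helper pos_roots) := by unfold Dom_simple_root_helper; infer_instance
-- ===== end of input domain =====

-- B replaces A's cubic triple-scan + sort + descending pop loop by a value-counter dict and a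
-- quadratic pair scan that builds the kept list directly (objective: faster). Both Pythons mutate
-- pos_roots in place to the same final list and return it.

-- ===== PORT A =====
-- pos_roots[i] is ported as pyGetD …: every index A uses (the loop indices i,j,k < len, and the pop
-- indices, which are in-range bad indices popped largest-first) is in range, so the default value /
-- the pop?'s `none` branch are never taken and the port is exact; A is total.
def simple_root_helper (pos_roots : List Int) : List Int :=
  let n : Int := PySem.List.len pos_roots
  let bad_roots : List Int :=
    (PySem.List.pyRange 0 n 1).foldl (fun acc i =>
      (PySem.List.pyRange (i+1) n 1).foldl (fun acc j =>
        (PySem.List.pyRange (j+1) n 1).foldl (fun acc k =>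
          let acc := if PySem.List.pyGetD pos_roots i 0 + PySem.List.pyGetD pos_roots j 0 == PySem.List.pyGetD pos_roots k 0 then acc ++ [k] else acc
          let acc := if PySem.List.pyGetD pos_roots j 0 + PySem.List.pyGetD pos_roots k 0 == PySem.List.pyGetD pos_roots i 0 then acc ++ [i] else acc
          if PySem.List.pyGetD pos_roots k 0 + PySem.List.pyGetD pos_roots i 0 == PySem.List.pyGetD pos_roots j 0 then acc ++ [j] else acc
        ) acc) acc) []
  let bad_roots_unique : List Int := PySem.List.sorted (PySem.Set.ofList bad_roots) (fun x => x) false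
  (PySem.List.pyRange (PySem.List.len bad_roots_unique - 1) (-1) (-1)).foldl
    (fun lst i =>
      match PySem.List.pop? lst (PySem.List.pyGetD bad_roots_unique i 0) with
      | some (_, rest) => rest
      | none => lst) pos_roots

-- ===== PORT B =====
-- helper `srh_expressible` ports Source B's inner early-return loop over p as List.any.
def srh_expressible (pos_roots : List Int) (cnt : PySem.Dict Int Int) (n m : Int) : Bool :=
  let vm := PySem.List.pyGetD pos_roots m 0
  (PySem.List.pyRange 0 n 1).any (fun p =>
    if p == m then false
    else
      let t := vm - PySem.List.pyGetD pos_roots p 0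
      let avail := PySem.Dict.getD cnt t 0 - (if vm == t then 1 else 0)
                   - (if PySem.List.pyGetD pos_roots p 0 == t then 1 else 0)
      decide (1 ≤ avail))

def simple_root_helper_alt (pos_roots : List Int) : List Int :=
  let n : Int := PySem.List.len pos_roots
  let cnt : PySem.Dict Int Int :=
    pos_roots.foldl (fun d v => d.insert v (d.getD v 0 + 1)) PySem.Dict.empty
  (PySem.List.pyRange 0 n 1).foldl (fun kept m =>
    if srh_expressible pos_roots cnt n m then kept
    else kept ++ [PySem.List.pyGetD pos_roots m 0]) []

-- ===== PRECONDITION & SPEC =====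
def Spec_simple_root_helper (pos_roots : List Int) (out : List Int) : Prop := out = simple_root_helper_alt pos_roots
instance (pos_roots : List Int) (out : List Int) : Decidable (Spec_simple_root_helper pos_roots out) := by unfold Spec_simple_root_helper; infer_instance

-- ===== CLAIM (what is proved, stated in full; the proofs are below) =====
def Claim_equal_simple_root_helper : Prop := ∀ (pos_roots : List Int), Dom_simple_root_helper pos_roots → Spec_simple_root_helper pos_roots (simple_root_helper pos_roots)

-- ===== LEMMAS AND PROOFS =====

-- index m of xs holds a root expressible as the sum of the roots at two other (distinct) indices
def srhBad (xs : List Int) (m : Nat) : Prop :=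
  ∃ p < xs.length, ∃ q < xs.length, p ≠ m ∧ q ≠ m ∧ p ≠ q ∧
    xs.getD p 0 + xs.getD q 0 = xs.getD m 0

-- Boolean version of srhBad, and the common normal form both ports are reduced to
def srhBadB (xs : List Int) (m : Nat) : Bool :=
  (List.range xs.length).any (fun p => (List.range xs.length).any (fun q =>
    decide (p ≠ m) && decide (q ≠ m) && decide (p ≠ q) &&
    decide (xs.getD p 0 + xs.getD q 0 = xs.getD m 0)))

def srhKeep (xs : List Int) : List Int :=
  ((List.range xs.length).filter (fun m => !(srhBadB xs m))).map (fun m => xs.getD m 0)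

lemma srhBadB_iff (xs : List Int) (m : Nat) : srhBadB xs m = true ↔ srhBad xs m := by
  unfold srhBadB srhBad
  simp only [List.any_eq_true, List.mem_range, Bool.and_eq_true, decide_eq_true_eq]
  constructor
  · rintro ⟨p, hp, q, hq, ⟨⟨h1, h2⟩, h3⟩, h4⟩
    exact ⟨p, hp, q, hq, h1, h2, h3, h4⟩
  · rintro ⟨p, hp, q, hq, h1, h2, h3, h4⟩
    exact ⟨p, hp, q, hq, ⟨⟨h1, h2⟩, h3⟩, h4⟩

lemma srh_v (xs : List Int) (i : Int) (h0 : 0 ≤ i) :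
    PySem.List.pyGetD xs i 0 = xs.getD i.toNat 0 := by
  conv_lhs => rw [show i = ((i.toNat : Nat) : Int) by omega, PySem.List.pyGetD_natCast]

lemma srh_map_getD_range (xs : List Int) :
    (List.range xs.length).map (fun m => xs.getD m 0) = xs := by
  apply List.ext_getElem
  · simp
  · intro i h1 h2
    simp [List.getD_eq_getElem?_getD, List.getElem?_eq_getElem h2]

-- ===== B side =====

lemma srh_count_split (xs : List Int) (m p : Nat) (t : Int)
    (hm : m < xs.length) (hp : p < xs.length) (hne : p ≠ m) :
    (1 ≤ (xs.count t : Int) - (if xs.getD m 0 == t then 1 else 0)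
        - (if xs.getD p 0 == t then 1 else 0))
    ↔ ∃ q : Nat, q < xs.length ∧ q ≠ m ∧ q ≠ p ∧ xs.getD q 0 = t := by
  classical
  set n := xs.length with hn
  set rest := (List.range n).filter (fun q => decide (q ≠ m) && decide (q ≠ p)) with hrest
  have hperm : (List.range n).Perm (m :: p :: rest) := by
    rw [List.perm_ext_iff_of_nodup (List.nodup_range) ?nd]
    case nd =>
      simp only [List.nodup_cons, hrest, List.mem_filter, List.mem_range]
      refine ⟨by simp [hne.symm], by simp, (List.nodup_range).filter _⟩
    intro a
    simp only [List.mem_range, List.mem_cons, hrest, List.mem_filter, decide_eq_true_eq,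
      Bool.and_eq_true]
    constructor
    · intro ha; by_cases h1 : a = m; · tauto
      by_cases h2 : a = p; · tauto
      tauto
    · rintro (rfl | rfl | ⟨ha, _⟩) <;> omega
  have hcount : xs.count t = (List.range n).countP (fun q => xs.getD q 0 == t) := by
    conv_lhs => rw [← srh_map_getD_range xs]
    simp [List.count, List.countP_map, Function.comp_def, hn]
  have hsplit : (List.range n).countP (fun q => xs.getD q 0 == t)
      = (if xs.getD m 0 == t then 1 else 0) + ((if xs.getD p 0 == t then 1 else 0)
        + rest.countP (fun q => xs.getD q 0 == t)) := by
    rw [hperm.countP_eq]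
    simp [List.countP_cons]
    split_ifs <;> omega
  have hpos : (0 < rest.countP (fun q => xs.getD q 0 == t))
      ↔ ∃ q : Nat, q < n ∧ q ≠ m ∧ q ≠ p ∧ xs.getD q 0 = t := by
    rw [List.countP_pos_iff]
    constructor
    · rintro ⟨q, hq, hqt⟩
      simp only [hrest, List.mem_filter, List.mem_range, Bool.and_eq_true, decide_eq_true_eq] at hq
      exact ⟨q, hq.1, hq.2.1, hq.2.2, by simpa [List.getD_eq_getElem?_getD] using hqt⟩
    · rintro ⟨q, h1, h2, h3, h4⟩
      exact ⟨q, by simp [hrest, List.mem_filter, List.mem_range, h1, h2, h3], by simpa [List.getD_eq_getElem?_getD] using h4⟩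
  rw [hcount, hsplit]
  rw [← hpos]
  push_cast
  split_ifs <;> omega

lemma srh_expressible_iff (xs : List Int) (m : Nat) (hm : m < xs.length) :
    (srh_expressible xs (xs.foldl (fun d v => d.insert v (d.getD v 0 + 1)) PySem.Dict.empty)
      (PySem.List.len xs) (m : Int) = true) ↔ srhBad xs m := by
  unfold srh_expressible
  rw [PySem.Dict.foldl_insert_getD_add_one_eq_counter]
  rw [List.any_eq_true]
  simp only [PySem.List.mem_pyRange_one, PySem.List.len_eq]
  constructor
  · rintro ⟨p, ⟨hp0, hpn⟩, hbody⟩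
    lift p to Nat using hp0 with P
    have hPn : P < xs.length := by exact_mod_cast hpn
    by_cases hPm : P = m
    · subst hPm; simp at hbody
    · rw [if_neg (by simpa using fun h => hPm (by exact_mod_cast h))] at hbody
      simp only [PySem.List.pyGetD_natCast, PySem.Dict.getD_counter, decide_eq_true_eq] at hbody
      rw [srh_count_split xs m P _ hm hPn hPm] at hbody
      obtain ⟨q, hq, hqm, hqP, hqt⟩ := hbody
      exact ⟨P, hPn, q, hq, hPm, hqm, fun h => hqP h.symm, by omega⟩
  · rintro ⟨p, hp, q, hq, hpm, hqm, hpq, hsum⟩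
    refine ⟨(p : Int), ⟨by positivity, by exact_mod_cast hp⟩, ?_⟩
    rw [if_neg (by simpa using fun h => hpm (by exact_mod_cast h))]
    simp only [PySem.List.pyGetD_natCast, PySem.Dict.getD_counter, decide_eq_true_eq]
    rw [srh_count_split xs m p _ hm hp hpm]
    exact ⟨q, hq, hqm, fun h => hpq h.symm, by omega⟩

lemma srh_alt_eq_keep (xs : List Int) : simple_root_helper_alt xs = srhKeep xs := by
  unfold simple_root_helper_alt srhKeep
  rw [PySem.List.foldl_congr_mem _ _
    (fun kept m => if !(srh_expressible xs (xs.foldl (fun d v => d.insert v (d.getD v 0 + 1)) PySem.Dict.empty) (PySem.List.len xs) m) then kept ++ [PySem.List.pyGetD xs m 0] else kept) _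
    (by intro acc x _
        cases hb : srh_expressible xs (xs.foldl (fun d v => d.insert v (d.getD v 0 + 1)) PySem.Dict.empty) (PySem.List.len xs) x <;>
          simp_all [PySem.List.len_eq])]
  rw [PySem.List.foldl_append_if]
  rw [PySem.List.len_eq, PySem.List.pyRange_zero_natCast]
  rw [List.filter_map, List.map_map]
  simp only [List.nil_append]
  rw [List.filter_congr (l := List.range xs.length)
    (q := fun m => !(srhBadB xs m)) ?hpred]
  case hpred =>
    intro k hk
    rw [List.mem_range] at hk
    have hiff := srh_expressible_iff xs k hk
    simp only [PySem.List.len_eq] at hiff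
    simp only [Function.comp_apply]
    cases hb : srhBadB xs k with
    | true =>
      rw [hiff.mpr ((srhBadB_iff xs k).mp hb)]
    | false =>
      have h : ¬ srhBad xs k := fun hh => by
        rw [(srhBadB_iff xs k).mpr hh] at hb; exact absurd hb (by simp)
      cases he : srh_expressible xs (xs.foldl (fun d v => d.insert v (d.getD v 0 + 1)) PySem.Dict.empty) (↑xs.length) (↑k) with
      | true => exact absurd (hiff.mp he) h
      | false => rfl
  apply List.map_congr_left
  intro k _
  simp [PySem.List.pyGetD_natCast]

-- ===== A side =====

lemma srh_mem_bad_roots (xs : List Int) (z : Int) :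
    z ∈ ((PySem.List.pyRange 0 (PySem.List.len xs) 1).foldl (fun acc i =>
      (PySem.List.pyRange (i+1) (PySem.List.len xs) 1).foldl (fun acc j =>
        (PySem.List.pyRange (j+1) (PySem.List.len xs) 1).foldl (fun acc k =>
          let acc := if PySem.List.pyGetD xs i 0 + PySem.List.pyGetD xs j 0 == PySem.List.pyGetD xs k 0 then acc ++ [k] else acc
          let acc := if PySem.List.pyGetD xs j 0 + PySem.List.pyGetD xs k 0 == PySem.List.pyGetD xs i 0 then acc ++ [i] else acc
          if PySem.List.pyGetD xs k 0 + PySem.List.pyGetD xs i 0 == PySem.List.pyGetD xs j 0 then acc ++ [j] else acc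
        ) acc) acc) [])
    ↔ ∃ m : Nat, z = (m : Int) ∧ m < xs.length ∧ srhBad xs m := by
  set n : Int := PySem.List.len xs with hn
  set v : Int → Int := fun i => PySem.List.pyGetD xs i 0 with hv
  set g : Int → Int → Int → List Int := fun i j k =>
    (if v i + v j == v k then [k] else []) ++
    ((if v j + v k == v i then [i] else []) ++ (if v k + v i == v j then [j] else [])) with hg
  have h3 : ∀ (acc : List Int) (i j : Int),
      (PySem.List.pyRange (j+1) n 1).foldl (fun acc k =>
          let a1 := if v i + v j == v k then acc ++ [k] else acc
          let a2 := if v j + v k == v i then a1 ++ [i] else a1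
          if v k + v i == v j then a2 ++ [j] else a2) acc
        = acc ++ (PySem.List.pyRange (j+1) n 1).flatMap (g i j) := by
    intro acc i j
    rw [PySem.List.foldl_congr_mem _ _ (fun acc k => acc ++ g i j k) _
      (by intro acc k _; simp only [hg]; split_ifs <;> simp)]
    exact PySem.List.foldl_append_eq_flatMap _ _ _
  have h2 : ∀ (acc : List Int) (i : Int),
      (PySem.List.pyRange (i+1) n 1).foldl (fun acc j =>
        (PySem.List.pyRange (j+1) n 1).foldl (fun acc k =>
          let a1 := if v i + v j == v k then acc ++ [k] else acc
          let a2 := if v j + v k == v i then a1 ++ [i] else a1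
          if v k + v i == v j then a2 ++ [j] else a2) acc) acc
        = acc ++ (PySem.List.pyRange (i+1) n 1).flatMap
            (fun j => (PySem.List.pyRange (j+1) n 1).flatMap (g i j)) := by
    intro acc i
    rw [PySem.List.foldl_congr_mem _ _
      (fun acc j => acc ++ (PySem.List.pyRange (j+1) n 1).flatMap (g i j)) _
      (by intro acc j _; exact h3 acc i j)]
    exact PySem.List.foldl_append_eq_flatMap _ _ _
  have h1 : ((PySem.List.pyRange 0 n 1).foldl (fun acc i =>
      (PySem.List.pyRange (i+1) n 1).foldl (fun acc j =>
        (PySem.List.pyRange (j+1) n 1).foldl (fun acc k =>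
          let a1 := if v i + v j == v k then acc ++ [k] else acc
          let a2 := if v j + v k == v i then a1 ++ [i] else a1
          if v k + v i == v j then a2 ++ [j] else a2) acc) acc) ([] : List Int))
      = (PySem.List.pyRange 0 n 1).flatMap (fun i =>
          (PySem.List.pyRange (i+1) n 1).flatMap
            (fun j => (PySem.List.pyRange (j+1) n 1).flatMap (g i j))) := by
    rw [PySem.List.foldl_congr_mem _ _
      (fun acc i => acc ++ (PySem.List.pyRange (i+1) n 1).flatMap
            (fun j => (PySem.List.pyRange (j+1) n 1).flatMap (g i j))) _
      (by intro acc i _; exact h2 acc i)]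
    rw [PySem.List.foldl_append_eq_flatMap]
    simp
  rw [h1]
  simp only [List.mem_flatMap, PySem.List.mem_pyRange_one, hg, List.mem_append]
  have hlen : n = (xs.length : Int) := by rw [hn, PySem.List.len_eq]
  constructor
  · rintro ⟨i, ⟨hi0, hin⟩, j, ⟨hij, hjn⟩, k, ⟨hjk, hkn⟩, hz⟩
    have hj0 : 0 ≤ j := by omega
    have hk0 : 0 ≤ k := by omega
    rw [hlen] at hin hjn hkn
    have hvi := srh_v xs i hi0
    have hvj := srh_v xs j hj0
    have hvk := srh_v xs k hk0
    simp only [hv, List.mem_ite_nil_right, List.mem_singleton, beq_iff_eq, hvi, hvj, hvk] at hz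
    rcases hz with ⟨hc, hzz⟩ | ⟨hc, hzz⟩ | ⟨hc, hzz⟩
    · exact ⟨k.toNat, by omega, by omega, i.toNat, by omega, j.toNat, by omega,
        by omega, by omega, by omega, hc⟩
    · exact ⟨i.toNat, by omega, by omega, j.toNat, by omega, k.toNat, by omega,
        by omega, by omega, by omega, hc⟩
    · exact ⟨j.toNat, by omega, by omega, k.toNat, by omega, i.toNat, by omega,
        by omega, by omega, by omega, by linarith⟩
  · rintro ⟨m, rfl, hm, p, hp, q, hq, hpm, hqm, hpq, hsum⟩
    have hvC : ∀ r : Nat, v (r : Int) = xs.getD r 0 := by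
      intro r
      show PySem.List.pyGetD xs (r : Int) 0 = xs.getD r 0
      rw [PySem.List.pyGetD_natCast]
    have main : ∀ p q : Nat, p < xs.length → q < xs.length → p ≠ m → q ≠ m → p < q →
        xs.getD p 0 + xs.getD q 0 = xs.getD m 0 →
        ∃ i, (0 ≤ i ∧ i < n) ∧ ∃ j, (i + 1 ≤ j ∧ j < n) ∧ ∃ k, (j + 1 ≤ k ∧ k < n) ∧
          ((m : Int) ∈ (if v i + v j == v k then [k] else []) ∨
           (m : Int) ∈ (if v j + v k == v i then [i] else []) ∨
           (m : Int) ∈ (if v k + v i == v j then [j] else [])) := by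
      intro p q hp hq hpm hqm hpq hsum
      rcases Nat.lt_trichotomy m p with hmp | rfl | hpm'
      · -- m < p < q : (i,j,k) = (m,p,q), second condition
        refine ⟨(m:Int), by omega, (p:Int), by omega, (q:Int), by omega, Or.inr (Or.inl ?_)⟩
        rw [if_pos (by rw [beq_iff_eq, hvC, hvC, hvC]; exact hsum)]
        simp
      · omega
      · rcases Nat.lt_trichotomy m q with hmq | rfl | hqm'
        · -- p < m < q : (i,j,k) = (p,m,q), third condition
          refine ⟨(p:Int), by omega, (m:Int), by omega, (q:Int), by omega, Or.inr (Or.inr ?_)⟩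
          rw [if_pos (by rw [beq_iff_eq, hvC, hvC, hvC]; linarith)]
          simp
        · omega
        · -- p < q < m : (i,j,k) = (p,q,m), first condition
          refine ⟨(p:Int), by omega, (q:Int), by omega, (m:Int), by omega, Or.inl ?_⟩
          rw [if_pos (by rw [beq_iff_eq, hvC, hvC, hvC]; exact hsum)]
          simp
    rcases Nat.lt_trichotomy p q with h | rfl | h
    · exact main p q hp hq hpm hqm h hsum
    · omega
    · exact main q p hq hp hqm hpm h (by linarith)

lemma srh_erase_chain (xs : List Int) (b : List Int)
    (hinc : b.Pairwise (· < ·)) (hb : ∀ z ∈ b, 0 ≤ z ∧ z < (xs.length : Int)) :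
    b.foldr (fun z lst =>
        match PySem.List.pop? lst z with
        | some (_, rest) => rest
        | none => lst) xs
      = ((List.range xs.length).filter (fun m : Nat => !(b.contains (((m : Int)))))).map (fun m => xs.getD m 0) := by
  induction b with
  | nil => simpa using (srh_map_getD_range xs).symm
  | cons z rest ih =>
    rw [List.pairwise_cons] at hinc
    obtain ⟨hzlt, hrest⟩ := hinc
    have hz0 : 0 ≤ z := (hb z (by simp)).1
    have hzn : z < (xs.length : Int) := (hb z (by simp)).2
    obtain ⟨a, rfl⟩ : ∃ a : Nat, z = (a : Int) := ⟨z.toNat, by omega⟩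
    have han : a < xs.length := by omega
    have ihr := ih hrest (fun y hy => hb y (by simp [hy]))
    rw [List.foldr_cons, ihr]
    -- split the index range at a+1
    have hsplit : List.range xs.length
        = List.range (a+1) ++ (List.range (xs.length - (a+1))).map ((a+1) + ·) := by
      rw [← List.range_add]
      congr 1
      omega
    -- the kept list for `rest` : prefix of all indices ≤ a, then the filtered tail
    have hpre_rest : (List.range (a+1)).filter (fun m : Nat => !(rest.contains (((m : Int)))))
        = List.range (a+1) := by
      apply List.filter_eq_self.mpr
      intro m hm
      rw [List.mem_range] at hm
      simp only [Bool.not_eq_eq_eq_not, Bool.not_true]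
      rw [List.contains_eq_any_beq]
      simp only [List.any_eq_false, beq_iff_eq]
      intro y hy
      have h1 := hzlt y hy
      have h2 := (hb y (by simp [hy])).1
      omega
    have hpre_cons : (List.range (a+1)).filter (fun m : Nat => !(((a : Int) :: rest).contains (((m : Int)))))
        = List.range a := by
      rw [List.range_succ, List.filter_append]
      have h1 : (List.range a).filter (fun m : Nat => !(((a : Int) :: rest).contains (((m : Int)))))
          = List.range a := by
        apply List.filter_eq_self.mpr
        intro m hm
        rw [List.mem_range] at hm
        simp only [Bool.not_eq_eq_eq_not, Bool.not_true]
        rw [List.contains_eq_any_beq]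
        simp only [List.any_eq_false, beq_iff_eq]
        intro y hy
        rcases List.mem_cons.mp hy with rfl | hy'
        · omega
        · have := hzlt y hy'; omega
      have h2 : ([a].filter (fun m : Nat => !(((a : Int) :: rest).contains (((m : Int)))))) = [] := by
        simp
      rw [h1, h2, List.append_nil]
    have htail_congr : ∀ m ∈ (List.range (xs.length - (a+1))).map ((a+1) + ·),
        (!(rest.contains (((m : Int))))) = (!(((a : Int) :: rest).contains (((m : Int))))) := by
      intro m hm
      rw [List.mem_map] at hm
      obtain ⟨k, _, rfl⟩ := hm
      rw [List.contains_cons]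
      have : (((a+1+k : Nat) : Int) == (a : Int)) = false := by
        simp only [beq_eq_false_iff_ne, ne_eq]
        omega
      rw [this, Bool.false_or]
    -- reduce the pop
    rw [hsplit, List.filter_append, hpre_rest, List.filter_append, hpre_cons]
    rw [List.map_append, List.map_append]
    have hlt : a < ((List.range (a+1)).map (fun m => xs.getD m 0)
        ++ ((List.range (xs.length - (a+1))).map ((a+1) + ·) |>.filter
            (fun m : Nat => !(rest.contains (((m : Int)))))).map (fun m => xs.getD m 0)).length := by
      simp only [List.length_append, List.length_map, List.length_range]
      omega
    rw [PySem.List.pop?_natCast _ a hlt]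
    simp only []
    rw [List.eraseIdx_append_of_lt_length (by simp)]
    have herase : ((List.range (a+1)).map (fun m => xs.getD m 0)).eraseIdx a
        = (List.range a).map (fun m => xs.getD m 0) := by
      rw [List.range_succ, List.map_append]
      rw [List.eraseIdx_append_of_length_le (by simp)]
      simp
    rw [herase, List.filter_congr htail_congr]

lemma srh_a_eq_keep (xs : List Int) : simple_root_helper xs = srhKeep xs := by
  unfold simple_root_helper srhKeep
  simp only []
  set B : List Int := ((PySem.List.pyRange 0 (PySem.List.len xs) 1).foldl (fun acc i =>
      (PySem.List.pyRange (i+1) (PySem.List.len xs) 1).foldl (fun acc j =>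
        (PySem.List.pyRange (j+1) (PySem.List.len xs) 1).foldl (fun acc k =>
          let acc := if PySem.List.pyGetD xs i 0 + PySem.List.pyGetD xs j 0 == PySem.List.pyGetD xs k 0 then acc ++ [k] else acc
          let acc := if PySem.List.pyGetD xs j 0 + PySem.List.pyGetD xs k 0 == PySem.List.pyGetD xs i 0 then acc ++ [i] else acc
          if PySem.List.pyGetD xs k 0 + PySem.List.pyGetD xs i 0 == PySem.List.pyGetD xs j 0 then acc ++ [j] else acc
        ) acc) acc) []) with hB
  set U : List Int := PySem.List.sorted (PySem.Set.ofList B) (fun x => x) false with hU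
  have hUmem : ∀ z : Int, z ∈ U ↔ ∃ m : Nat, z = (m : Int) ∧ m < xs.length ∧ srhBad xs m := by
    intro z
    rw [hU, PySem.List.mem_sorted, PySem.Set.mem_ofList, hB]
    exact srh_mem_bad_roots xs z
  have hUinc : U.Pairwise (· < ·) := by
    rw [hU]; exact PySem.List.sorted_ofList_pairwise_lt B
  have hUb : ∀ z ∈ U, 0 ≤ z ∧ z < (xs.length : Int) := by
    intro z hz
    obtain ⟨m, rfl, hm, _⟩ := (hUmem z).mp hz
    constructor <;> omega
  have hrange : PySem.List.pyRange (PySem.List.len U - 1) (-1) (-1)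
      = (PySem.List.pyRange 0 (PySem.List.len U) 1).reverse := by
    rw [PySem.List.pyRange_neg_one_eq_reverse]
    norm_num
  rw [hrange, List.foldl_reverse]
  have hfoldr : (PySem.List.pyRange 0 (PySem.List.len U) 1).foldr
      (fun i lst => match PySem.List.pop? lst (PySem.List.pyGetD U i 0) with
        | some (_, rest) => rest
        | none => lst) xs
      = U.foldr (fun z lst => match PySem.List.pop? lst z with
        | some (_, rest) => rest
        | none => lst) xs := by
    conv_rhs => rw [← PySem.List.map_pyGetD_pyRange_zero U 0]
    rw [List.foldr_map]
  rw [hfoldr, srh_erase_chain xs U hUinc hUb]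
  apply congrArg
  apply List.filter_congr
  intro m hm
  rw [List.mem_range] at hm
  have : U.contains ((m : Int)) = srhBadB xs m := by
    by_cases h : srhBad xs m
    · rw [(srhBadB_iff xs m).mpr h]
      rw [List.contains_eq_any_beq, List.any_eq_true]
      exact ⟨(m : Int), (hUmem _).mpr ⟨m, rfl, hm, h⟩, by simp⟩
    · rw [show srhBadB xs m = false from by
        cases hbb : srhBadB xs m
        · rfl
        · exact absurd ((srhBadB_iff xs m).mp hbb) h]
      rw [List.contains_eq_any_beq, List.any_eq_false]
      intro z hz
      obtain ⟨m', rfl, hm', hbad⟩ := (hUmem z).mp hz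
      intro hcast
      rw [beq_iff_eq] at hcast
      exact h (by rw [show m = m' from by exact_mod_cast hcast]; exact hbad)
  rw [this]

-- ===== VERDICT (by name: the statement is the Claim_ definition above) =====
theorem simple_root_helper_spec : Claim_equal_simple_root_helper := by
  intro pos_roots _
  show simple_root_helper pos_roots = simple_root_helper_alt pos_roots
  rw [srh_a_eq_keep, srh_alt_eq_keep]
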